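-- pv_equiv track=rewrite | github.com/LuisDee/architect | scripts/merge_discoveries.py | validate_urgency
-- ===== SOURCE A (Python) =====
-- def validate_urgency(entry: dict, track_states: dict) -> str | None:
--     """Validate and potentially escalate urgency based on track states.
--
--     Returns new urgency if escalated, None if unchanged.
--     """
--     urgency = entry.get("urgency", "BACKLOG").upper()
--     deps_text = entry.get("dependencies", "")
--
--     if urgency == "BLOCKING":
--         return None  # Already highest
--
--     # Check if this blocks an IN_PROGRESS track
--     for tid, meta in track_states.items():
--         if meta.get("status") == "in_progress" and tid in deps_text:
--             return "BLOCKING"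
--
--     # Check if this blocks a track in the next wave
--     if urgency == "BACKLOG":
--         for tid, meta in track_states.items():
--             state = meta.get("status", "new")
--             if state == "new" and tid in deps_text:
--                 return "NEXT_WAVE"
--
--     return None
-- ===== SOURCE B (Python) =====
-- def validate_urgency(entry: dict, track_states: dict) -> str | None:
--     """Single pass over track_states: escalate to BLOCKING immediately on an
--     in_progress dependent track, remember whether a 'new' dependent track was
--     seen, and decide NEXT_WAVE after the loop."""
--     urgency = entry.get("urgency", "BACKLOG").upper()
--     deps_text = entry.get("dependencies", "")
--     if urgency == "BLOCKING":
--         return None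
--     found_next_wave = False
--     for tid, meta in track_states.items():
--         status = meta.get("status", "new")
--         if tid in deps_text:
--             if status == "in_progress":
--                 return "BLOCKING"
--             if urgency == "BACKLOG" and status == "new":
--                 found_next_wave = True
--     return "NEXT_WAVE" if found_next_wave else None
-- ===== Notes on version B (the rewrite author's own statement) =====
-- stated objective: simpler
-- what changed: A's two separate scans over track_states (one for in_progress dependents, one for new dependents) are merged into a single pass that returns BLOCKING immediately and carries a found_next_wave flag decided after the loop.
import Mathlib
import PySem

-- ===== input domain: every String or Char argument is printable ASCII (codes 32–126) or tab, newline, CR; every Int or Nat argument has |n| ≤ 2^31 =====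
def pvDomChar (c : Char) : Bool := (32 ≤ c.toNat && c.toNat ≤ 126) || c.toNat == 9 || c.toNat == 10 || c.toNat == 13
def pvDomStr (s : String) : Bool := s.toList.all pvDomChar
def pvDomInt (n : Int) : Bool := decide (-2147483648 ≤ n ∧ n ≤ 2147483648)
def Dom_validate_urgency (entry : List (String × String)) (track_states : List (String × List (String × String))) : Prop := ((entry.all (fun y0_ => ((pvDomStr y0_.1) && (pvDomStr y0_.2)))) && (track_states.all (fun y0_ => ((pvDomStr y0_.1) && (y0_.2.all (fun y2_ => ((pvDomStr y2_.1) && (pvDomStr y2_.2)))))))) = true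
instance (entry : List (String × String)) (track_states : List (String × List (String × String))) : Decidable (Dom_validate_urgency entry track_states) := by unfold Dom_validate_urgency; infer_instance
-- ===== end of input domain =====

-- B merges A's two scans over track_states into one pass with a found_next_wave flag (objective: simpler).

-- shared glue: association-list dict lookup, first match (dict.get)
def pvGet? (d : List (String × String)) (k : String) : Option String :=
  match d with
  | [] => none
  | (a, b) :: t => if a == k then some b else pvGet? t k

def pvGetD (d : List (String × String)) (k dflt : String) : String :=
  (pvGet? d k).getD dflt

-- ===== PORT A =====
-- first loop: any in_progress track whose id occurs in deps_text
def aLoop1 (deps : String) : List (String × List (String × String)) → Option String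
  | [] => none
  | (tid, md) :: rest =>
    if pvGet? md "status" == some "in_progress" && PySem.Str.isIn tid deps then some "BLOCKING"
    else aLoop1 deps rest

-- second loop: any new track whose id occurs in deps_text
def aLoop2 (deps : String) : List (String × List (String × String)) → Option String
  | [] => none
  | (tid, md) :: rest =>
    if pvGetD md "status" "new" == "new" && PySem.Str.isIn tid deps then some "NEXT_WAVE"
    else aLoop2 deps rest

def validate_urgency (entry : List (String × String)) (track_states : List (String × List (String × String))) : Option String :=
  let urgency := PySem.Str.upper (pvGetD entry "urgency" "BACKLOG")
  let deps_text := pvGetD entry "dependencies" ""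
  if urgency == "BLOCKING" then none
  else
    match aLoop1 deps_text track_states with
    | some s => some s
    | none =>
      if urgency == "BACKLOG" then aLoop2 deps_text track_states else none

-- ===== PORT B =====
-- one pass, early return on BLOCKING, flag for NEXT_WAVE decided after the loop
def bLoop (urgency deps : String) (found : Bool) : List (String × List (String × String)) → Option String
  | [] => if found then some "NEXT_WAVE" else none
  | (tid, md) :: rest =>
    let status := pvGetD md "status" "new"
    if PySem.Str.isIn tid deps then
      if status == "in_progress" then some "BLOCKING"
      else bLoop urgency deps (found || (urgency == "BACKLOG" && status == "new")) rest
    else bLoop urgency deps found rest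

def validate_urgency_alt (entry : List (String × String)) (track_states : List (String × List (String × String))) : Option String :=
  let urgency := PySem.Str.upper (pvGetD entry "urgency" "BACKLOG")
  let deps_text := pvGetD entry "dependencies" ""
  if urgency == "BLOCKING" then none
  else bLoop urgency deps_text false track_states

-- ===== PRECONDITION & SPEC =====
def Spec_validate_urgency (entry : List (String × String)) (track_states : List (String × List (String × String))) (out : Option String) : Prop := out = validate_urgency_alt entry track_states
instance (entry : List (String × String)) (track_states : List (String × List (String × String))) (out : Option String) : Decidable (Spec_validate_urgency entry track_states out) := by unfold Spec_validate_urgency; infer_instance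

-- ===== CLAIM (what is proved, stated in full; the proofs are below) =====
def Claim_equal_validate_urgency : Prop := ∀ (entry : List (String × String)) (track_states : List (String × List (String × String))), Dom_validate_urgency entry track_states → Spec_validate_urgency entry track_states (validate_urgency entry track_states)

-- ===== LEMMAS AND PROOFS =====

-- when getD "new" yields "in_progress", get? was some "in_progress"
theorem pvGetD_in_progress (md : List (String × String))
    (h : pvGetD md "status" "new" = "in_progress") :
    pvGet? md "status" = some "in_progress" := by
  unfold pvGetD at h
  cases hg : pvGet? md "status" with
  | none => simp [hg] at h
  | some v => simp [hg] at h; simp [h]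

-- aLoop2 only ever returns "NEXT_WAVE"
theorem aLoop2_next_wave (deps : String) (ts : List (String × List (String × String)))
    (v : String) (h : aLoop2 deps ts = some v) : v = "NEXT_WAVE" := by
  induction ts with
  | nil => simp [aLoop2] at h
  | cons p r ih =>
    obtain ⟨tid, md⟩ := p
    by_cases hc : pvGetD md "status" "new" = "new" ∧ PySem.Chars.isIn tid.toList deps.toList = true
    · simp [aLoop2, hc] at h
      first | exact h | exact h.symm
    · rw [aLoop2, if_neg (by simpa using hc)] at h; exact ih h

-- B's single loop computes A's two loops' combined answer
theorem bLoop_eq (urg deps : String) (ts : List (String × List (String × String))) (found : Bool) :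
    bLoop urg deps found ts =
      match aLoop1 deps ts with
      | some s => some s
      | none =>
        if found || (urg == "BACKLOG" && (aLoop2 deps ts).isSome) then some "NEXT_WAVE" else none := by
  induction ts generalizing found with
  | nil => simp [bLoop, aLoop1, aLoop2]
  | cons p rest ih =>
    obtain ⟨tid, md⟩ := p
    by_cases hin : PySem.Chars.isIn tid.toList deps.toList = true
    · by_cases hip : pvGetD md "status" "new" = "in_progress"
      · have hg := pvGetD_in_progress md hip
        simp [bLoop, aLoop1, hin, hip, hg]
      · have hipb : (pvGetD md "status" "new" == "in_progress") = false := by simpa using hip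
        have hg : (pvGet? md "status" == some "in_progress") = false := by
          cases hgg : pvGet? md "status" with
          | none => simp
          | some v =>
            simp only [pvGetD, hgg, Option.getD_some] at hip
            simpa using hip
        by_cases hnew : pvGetD md "status" "new" = "new"
        · simp only [bLoop, aLoop1, aLoop2, PySem.Str.isIn_eq, hin, hg, hnew, ih,
            if_true]
          cases aLoop1 deps rest <;>
            cases found <;> cases hu : (urg == "BACKLOG") <;> simp
        · have hnewb : (pvGetD md "status" "new" == "new") = false := by simpa using hnew
          simp only [bLoop, aLoop1, aLoop2, PySem.Str.isIn_eq, hin, hipb, hg, hnewb, ih]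
          simp
    · have hinb : PySem.Chars.isIn tid.toList deps.toList = false := by simpa using hin
      simp only [bLoop, aLoop1, aLoop2, PySem.Str.isIn_eq, hinb, ih]
      simp

-- ===== VERDICT (by name: the statement is the Claim_ definition above) =====
theorem validate_urgency_spec : Claim_equal_validate_urgency := by
  intro entry ts _
  unfold Spec_validate_urgency validate_urgency validate_urgency_alt
  by_cases hb : PySem.Str.upper (pvGetD entry "urgency" "BACKLOG") = "BLOCKING"
  · simp [hb]
  · simp only [beq_iff_eq, if_neg hb]
    rw [bLoop_eq]
    cases aLoop1 (pvGetD entry "dependencies" "") ts with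
    | some s => simp
    | none =>
      by_cases hbk : PySem.Str.upper (pvGetD entry "urgency" "BACKLOG") = "BACKLOG"
      · simp only [hbk]
        cases h2 : aLoop2 (pvGetD entry "dependencies" "") ts with
        | none => simp
        | some v => simp [aLoop2_next_wave _ _ _ h2]
      · have : (PySem.Str.upper (pvGetD entry "urgency" "BACKLOG") == "BACKLOG") = false := by
          simpa using hbk
        simp [hbk, this]
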